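-- pv_equiv track=rewrite | github.com/joanasteodoro/The-Playfair-Cipher | fp_projeto2.py | digramas
-- ===== SOURCE A (Python) =====
-- def digramas (mens):
--     #Funcao que cria os digramas da mensagem introduzida
--     mens = mens.replace (' ', '') #retiram-se os espacos da mensagem
--     digrm = ''
--     while len(mens) >= 2: #verificam-se todos os casos, de duas em duas letras (quando a mensagem tem um numero de caracteres par, basta entrar neste ciclo para obter os digramas finais)
--         if mens[0] == mens[1]:
--             digrm += mens[0] + 'X'
--             mens = mens[1:]
--         else:
--             digrm += mens[0] + mens[1]
--             mens = mens[2:]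
--     #quando o numero de caracteres da mensagem e impar, e preciso adicionar, aos digramas finais, a ultima letra, assim como 'X'
--     if len(mens) == 1:
--         digrm += mens + 'X'
--     return digrm
-- ===== SOURCE B (Python) =====
-- def digramas(mens):
--     # One-pass digram builder: keep a single pending first-half character.
--     out = []
--     pending = None
--     for c in mens:
--         if c == ' ':
--             continue
--         if pending is None:
--             pending = c
--         elif c == pending:
--             out.append(pending + 'X')
--             pending = c
--         else:
--             out.append(pending + c)
--             pending = None
--     if pending is not None:
--         out.append(pending + 'X')
--     return ''.join(out)
-- ===== Notes on version B (the rewrite author's own statement) =====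
-- stated objective: faster
-- what changed: Replaces the while-loop that repeatedly re-slices the remaining message (quadratic string slicing and += concatenation) with a single pass over the characters carrying one held first-half character of state, collecting digrams in a list joined once.
import Mathlib
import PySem

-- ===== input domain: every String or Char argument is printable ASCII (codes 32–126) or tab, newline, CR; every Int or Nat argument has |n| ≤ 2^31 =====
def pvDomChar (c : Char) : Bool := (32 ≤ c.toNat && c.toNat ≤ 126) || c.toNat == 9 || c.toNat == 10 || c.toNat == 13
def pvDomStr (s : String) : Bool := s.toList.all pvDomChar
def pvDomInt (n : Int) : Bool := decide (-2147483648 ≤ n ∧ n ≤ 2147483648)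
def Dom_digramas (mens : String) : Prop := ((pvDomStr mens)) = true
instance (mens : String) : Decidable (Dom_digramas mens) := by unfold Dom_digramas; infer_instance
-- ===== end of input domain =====

-- B builds the digrams in one pass carrying a single held first-half character, instead of A's while-loop that re-slices the remaining message; measured faster.

-- ===== PORT A =====
-- the while-loop: consumes the message two (or one, on a doubled letter) chars at a time
def digramasGo (digrm : List Char) (mens : List Char) : List Char × List Char :=
  match mens with
  | a :: b :: rest =>
    if a == b then digramasGo (digrm ++ [a, 'X']) (b :: rest)
    else digramasGo (digrm ++ [a, b]) rest
  | _ => (digrm, mens)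
termination_by mens.length

def digramas (mens : String) : String :=
  let m := PySem.Chars.replace mens.toList [' '] []   -- mens.replace(' ', '')
  let p := digramasGo [] m
  String.mk (if p.2.length == 1 then p.1 ++ p.2 ++ ['X'] else p.1)

-- ===== PORT B =====
def stepB (st : List Char × Option Char) (c : Char) : List Char × Option Char :=
  if c == ' ' then st
  else
    match st.2 with
    | none => (st.1, some c)
    | some p => if c == p then (st.1 ++ [p, 'X'], some c) else (st.1 ++ [p, c], none)

def digramas_alt (mens : String) : String :=
  let st := mens.toList.foldl stepB ([], none)
  String.mk (match st.2 with
    | some p => st.1 ++ [p, 'X']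
    | none => st.1)

-- ===== PRECONDITION & SPEC =====
def Spec_digramas (mens : String) (out : String) : Prop := out = digramas_alt mens
instance (mens : String) (out : String) : Decidable (Spec_digramas mens out) := by unfold Spec_digramas; infer_instance

-- ===== CLAIM (what is proved, stated in full; the proofs are below) =====
def Claim_equal_digramas : Prop := ∀ (mens : String), Dom_digramas mens → Spec_digramas mens (digramas mens)

-- ===== LEMMAS AND PROOFS =====

-- canonical digram list of a space-free message
def dA : List Char → List Char
  | a :: b :: rest => if a == b then a :: 'X' :: dA (b :: rest) else a :: b :: dA rest
  | [a] => [a, 'X']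
  | [] => []
termination_by l => l.length

lemma replace_space_go (fuel : Nat) (l acc : List Char) (h : l.length ≤ fuel) :
    PySem.Chars.replace.go [' '] [] fuel l acc = acc.reverse ++ l.filter (· != ' ') := by
  induction fuel generalizing l acc with
  | zero =>
    have : l = [] := List.length_eq_zero_iff.mp (Nat.le_zero.mp h)
    subst this; simp [PySem.Chars.replace.go]
  | succ n ih =>
    cases l with
    | nil => simp [PySem.Chars.replace.go]
    | cons c t =>
      by_cases hc : c = ' '
      · subst hc
        rw [PySem.Chars.replace.go]
        rw [List.filter_cons_of_neg (by simp)]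
        simp only [List.isPrefixOf, BEq.rfl, Bool.and_true, if_pos]
        simpa using ih t acc (by simpa using Nat.le_of_succ_le_succ h)
      · rw [PySem.Chars.replace.go]
        have hpre : List.isPrefixOf [' '] (c :: t) = false := by
          simp [List.isPrefixOf]; exact fun h => absurd h.symm hc
        rw [hpre]
        simp only [Bool.false_eq_true, if_false]
        rw [ih t (c :: acc) (by simpa using Nat.le_of_succ_le_succ h)]
        rw [List.filter_cons_of_pos (by simpa using hc)]
        simp

lemma replace_space (l : List Char) :
    PySem.Chars.replace l [' '] [] = l.filter (· != ' ') := by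
  rw [PySem.Chars.replace, if_neg (by simp)]
  exact replace_space_go l.length l [] (le_refl _)

lemma digramasGo_dA (l digrm : List Char) :
    (if (digramasGo digrm l).2.length == 1
     then (digramasGo digrm l).1 ++ (digramasGo digrm l).2 ++ ['X']
     else (digramasGo digrm l).1) = digrm ++ dA l := by
  fun_induction digramasGo digrm l with
  | case1 digrm a b rest hab ih =>
    rw [dA]; rw [if_pos hab] at *
    simpa using ih
  | case2 digrm a b rest hab ih =>
    rw [dA]; rw [if_neg hab] at *
    simpa using ih
  | case3 digrm mens hm =>
    rcases mens with _ | ⟨a, _ | ⟨b, r⟩⟩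
    · simp [dA]
    · simp [dA]
    · exact absurd rfl (by intro h; exact hm a b r h)

def flushB (st : List Char × Option Char) : List Char :=
  match st.2 with
  | some p => st.1 ++ [p, 'X']
  | none => st.1

lemma foldl_stepB_filter (l : List Char) (st : List Char × Option Char) :
    l.foldl stepB st = (l.filter (· != ' ')).foldl stepB st := by
  induction l generalizing st with
  | nil => rfl
  | cons c t ih =>
    by_cases hc : c = ' '
    · subst hc
      rw [List.filter_cons_of_neg (by simp)]
      simp only [List.foldl, stepB]
      exact ih _
    · rw [List.filter_cons_of_pos (by simpa using hc)]
      simp only [List.foldl]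
      exact ih _

lemma dA_cons_cons (a b : Char) (rest : List Char) :
    dA (a :: b :: rest) = if a == b then a :: 'X' :: dA (b :: rest) else a :: b :: dA rest := by
  rw [dA.eq_def]

lemma foldl_stepB_dA (l : List Char) (acc : List Char) (p? : Option Char)
    (hs : ∀ c ∈ l, c ≠ ' ') :
    flushB (l.foldl stepB (acc, p?)) =
      acc ++ (match p? with | none => dA l | some p => dA (p :: l)) := by
  induction l generalizing acc p? with
  | nil =>
    cases p? with
    | none => simp [flushB, dA]
    | some p => simp [flushB, dA]
  | cons c t ih =>
    have hc : c ≠ ' ' := hs c (List.mem_cons_self)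
    have hst : ∀ x ∈ t, x ≠ ' ' := fun x hx => hs x (List.mem_cons_of_mem _ hx)
    have hc' : (c == ' ') = false := by simpa using hc
    cases p? with
    | none =>
      dsimp only
      simp only [List.foldl, stepB, hc', Bool.false_eq_true, if_false]
      simpa using ih acc (some c) hst
    | some p =>
      dsimp only
      by_cases hcp : c = p
      · subst hcp
        rw [dA_cons_cons]
        simp only [List.foldl, stepB, hc', Bool.false_eq_true, if_false, BEq.rfl, if_true]
        rw [ih (acc ++ [c, 'X']) (some c) hst]
        simp
      · have h1 : (c == p) = false := by simpa using hcp
        have h2 : (p == c) = false := by simpa using (Ne.symm hcp)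
        rw [dA_cons_cons]
        simp only [List.foldl, stepB, hc', Bool.false_eq_true, if_false, h1, h2]
        rw [ih (acc ++ [p, c]) none hst]
        simp

-- ===== VERDICT (by name: the statement is the Claim_ definition above) =====
theorem digramas_spec : Claim_equal_digramas := by
  intro mens _
  unfold Spec_digramas digramas digramas_alt
  dsimp only
  rw [replace_space]
  have hA := digramasGo_dA (mens.toList.filter (· != ' ')) []
  simp only [List.nil_append] at hA
  rw [hA]
  rw [foldl_stepB_filter]
  have hB := foldl_stepB_dA (mens.toList.filter (· != ' ')) [] none
    (by intro c hc; simpa using (List.of_mem_filter hc))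
  simp only [List.nil_append] at hB
  rw [← hB]
  rfl
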